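-- pv_equiv track=rewrite | github.com/YAAA-AI/NGRAM_Capstone | ngram-predictor/main.py | build_context_index
-- ===== SOURCE A (Python) =====
-- from collections import Counter, defaultdict
--
-- def build_context_index(ngram_counts):
--     """Build a lookup index mapping (n-1)-word contexts to candidate next words.
--
--     Args:
--         ngram_counts: A Counter of n-gram tuples and their frequencies.
--
--     Returns:
--         A dict mapping context tuples to lists of (word, count) pairs sorted by
--         frequency in descending order.
--     """
--     context_index = defaultdict(list)
--     for ngram, count in ngram_counts.items():
--         context = ngram[:-1]
--         context_index[context].append((ngram[-1], count))
--     for context in context_index: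
--         context_index[context].sort(key=lambda x: x[1], reverse=True)
--     return dict(context_index)
-- ===== SOURCE B (Python) =====
-- def build_context_index(ngram_counts):
--     """One-pass variant: keep each context's candidate list sorted while
--     inserting, instead of grouping first and sorting every bucket afterwards."""
--     context_index = {}
--     for ngram, count in ngram_counts.items():
--         bucket = context_index.setdefault(ngram[:-1], [])
--         pos = 0
--         while pos < len(bucket) and bucket[pos][1] >= count:
--             pos += 1
--         bucket.insert(pos, (ngram[-1], count))
--     return context_index
-- ===== Notes on version B (the rewrite author's own statement) =====
-- stated objective: alternative
-- what changed: A groups all (word,count) pairs by context and then runs a second loop sorting every bucket; B is a single pass that keeps each context's bucket in descending-count order by inserting every candidate at its stable position, so the second loop and the per-bucket sort disappear. Pre_ excludes inputs containing a zero-length ngram (there A's ngram[-1] raises IndexError) and association lists with duplicate ngram keys, which do not represent a Counter.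
import Mathlib
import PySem

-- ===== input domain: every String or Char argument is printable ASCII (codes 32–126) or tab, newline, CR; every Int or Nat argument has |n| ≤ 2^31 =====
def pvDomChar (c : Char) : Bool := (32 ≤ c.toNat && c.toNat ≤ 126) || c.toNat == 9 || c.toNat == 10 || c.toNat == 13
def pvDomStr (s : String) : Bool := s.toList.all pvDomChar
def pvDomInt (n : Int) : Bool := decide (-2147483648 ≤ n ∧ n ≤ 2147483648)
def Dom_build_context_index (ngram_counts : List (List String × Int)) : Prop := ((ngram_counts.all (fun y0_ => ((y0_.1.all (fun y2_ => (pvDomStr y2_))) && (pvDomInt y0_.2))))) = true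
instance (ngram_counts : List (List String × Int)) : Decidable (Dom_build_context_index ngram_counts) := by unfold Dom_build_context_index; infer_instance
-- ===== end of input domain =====

-- B replaces A's group-then-sort-every-bucket with a single pass that keeps each
-- bucket sorted by inserting every candidate at its stable descending position
-- (objective: alternative decomposition, same results; no speed claim).

-- ===== PORT A =====
-- for ngram, count: context_index[ngram[:-1]].append((ngram[-1], count)), then
-- a second loop sorting every bucket by count, descending, stable.
def build_context_index (ngram_counts : List (List String × Int)) : List (List String × List (String × Int)) :=
  let ci : PySem.Dict (List String) (List (String × Int)) :=
    ngram_counts.foldl (fun d p =>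
      d.modify (PySem.List.slice p.1 none (some (-1))) []
        (fun b => b ++ [(PySem.List.pyGetD p.1 (-1) "", p.2)])) PySem.Dict.empty
  let ci2 : PySem.Dict (List String) (List (String × Int)) :=
    ci.keys.foldl (fun d c =>
      d.insert c (PySem.List.sorted (d.getD c []) (fun x => x.2) true)) ci
  ci2.items

-- ===== PORT B =====
-- bucket.insert(pos, ...) where pos skips the entries with count >= the new
-- count: transcribed as structural recursion over the bucket.
def pvInsertDesc (x : String × Int) : List (String × Int) → List (String × Int)
  | [] => [x]
  | y :: ys => if y.2 ≥ x.2 then y :: pvInsertDesc x ys else x :: y :: ys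

def build_context_index_alt (ngram_counts : List (List String × Int)) : List (List String × List (String × Int)) :=
  (ngram_counts.foldl (fun d p =>
      d.modify (PySem.List.slice p.1 none (some (-1))) []
        (pvInsertDesc (PySem.List.pyGetD p.1 (-1) "", p.2))) PySem.Dict.empty).items

-- ===== PRECONDITION & SPEC =====
-- Pre_ excludes association lists with duplicate ngram keys (such a list does not
-- faithfully represent A's Counter argument: Python collapses the duplicates
-- before the function runs) and lists containing a zero-length ngram (there Python's
-- ngram[-1] raises IndexError).
def Pre_build_context_index (ngram_counts : List (List String × Int)) : Prop :=
  (ngram_counts.map Prod.fst).Nodup ∧ ∀ p ∈ ngram_counts, p.1 ≠ []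
instance (ngram_counts : List (List String × Int)) : Decidable (Pre_build_context_index ngram_counts) := by unfold Pre_build_context_index; infer_instance

def pvWitness_build_context_index : (List (List String × Int)) :=
  [(["a", "b"], 2), (["a", "c"], 1), (["b"], 3), (["a", "d"], 2)]

def Spec_build_context_index (ngram_counts : List (List String × Int)) (out : List (List String × List (String × Int))) : Prop := out = build_context_index_alt ngram_counts
instance (ngram_counts : List (List String × Int)) (out : List (List String × List (String × Int))) : Decidable (Spec_build_context_index ngram_counts out) := by unfold Spec_build_context_index; infer_instance

-- ===== CLAIM (what is proved, stated in full; the proofs are below) =====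
def Claim_equal_build_context_index : Prop := ∀ (ngram_counts : List (List String × Int)), Dom_build_context_index ngram_counts → Pre_build_context_index ngram_counts → Spec_build_context_index ngram_counts (build_context_index ngram_counts)

-- ===== LEMMAS AND PROOFS =====

-- 'sort once' of a bucket, the value A's second loop produces
def pvSortDesc (v : List (String × Int)) : List (String × Int) :=
  PySem.List.sorted v (fun x => x.2) true

def pvG (q : List String × List (String × Int)) : List String × List (String × Int) :=
  (q.1, pvSortDesc q.2)

-- B's insertion is exactly the insertBy step of Python's stable reverse sort
theorem pvInsertDesc_eq_insertBy (x : String × Int) (ys : List (String × Int)) :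
    pvInsertDesc x ys = PySem.List.insertBy (fun a b => decide (b.2 < a.2)) x ys := by
  induction ys with
  | nil => rfl
  | cons y ys ih =>
    simp only [pvInsertDesc, PySem.List.insertBy, ih]
    by_cases h : y.2 ≥ x.2
    · simp [h, not_lt.mpr h]
    · simp [h, lt_of_not_ge h]

theorem pvSortDesc_append_one (v : List (String × Int)) (x : String × Int) :
    pvSortDesc (v ++ [x]) = pvInsertDesc x (pvSortDesc v) := by
  simp only [pvSortDesc, PySem.List.sorted_rev_eq_foldl_insertBy, List.foldl_append,
    List.foldl_cons, List.foldl_nil, pvInsertDesc_eq_insertBy]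

-- lookup in a pvG-mapped item list
theorem pvGet?_map_pvG (l : List (List String × List (String × Int))) (k : List String) :
    (PySem.Dict.mk (l.map pvG)).get? k = ((PySem.Dict.mk l).get? k).map pvSortDesc := by
  simp only [PySem.Dict.get?, List.find?_map]
  have : ((fun p : List String × List (String × Int) => p.1 == k) ∘ pvG) =
      (fun p : List String × List (String × Int) => p.1 == k) := by
    funext p; rfl
  rw [this]
  cases l.find? (fun p => p.1 == k) <;> rfl

theorem pvContains_map_pvG (l : List (List String × List (String × Int))) (k : List String) :
    (PySem.Dict.mk (l.map pvG)).contains k = (PySem.Dict.mk l).contains k := by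
  simp only [PySem.Dict.contains, List.any_map]
  rfl

-- one step of B's loop tracks one step of A's first loop through pvG
theorem pvStep_map (d : PySem.Dict (List String) (List (String × Int)))
    (k : List String) (x : String × Int) :
    (PySem.Dict.mk (d.items.map pvG)).modify k [] (pvInsertDesc x) =
      PySem.Dict.mk (((d.modify k [] (fun b => b ++ [x])).items).map pvG) := by
  simp only [PySem.Dict.modify, PySem.Dict.getD, pvGet?_map_pvG]
  have hv : ((d.get? k).map pvSortDesc).getD [] = pvSortDesc ((d.get? k).getD []) := by
    cases d.get? k <;> rfl
  rw [hv, ← pvSortDesc_append_one]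
  simp only [PySem.Dict.insert, pvContains_map_pvG]
  by_cases hc : (PySem.Dict.mk d.items).contains k
  · have hc' : d.contains k = true := hc
    simp only [hc, if_pos, List.map_map]
    congr 1
    apply List.map_congr_left
    intro q _
    by_cases hq : q.1 == k
    · simp [Function.comp, pvG, hq]
    · simp [Function.comp, pvG, hq]
  · have hc' : d.contains k = false := by
      rw [← Bool.not_eq_true]; exact hc
    have hn : d.get? k = none := (PySem.Dict.get?_eq_none_iff_contains d k).mpr hc'
    simp only [hc, Bool.false_eq_true, if_false, hn]
    simp [pvG, pvSortDesc, PySem.List.sorted, PySem.List.insertBy]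

-- the whole first loop: B's dict is A's grouped dict with every bucket sorted
theorem pvLoop1 (l : List (List String × Int)) :
    ∀ d : PySem.Dict (List String) (List (String × Int)),
    (l.foldl (fun d p =>
        d.modify (PySem.List.slice p.1 none (some (-1))) []
          (pvInsertDesc (PySem.List.pyGetD p.1 (-1) "", p.2)))
      (PySem.Dict.mk (d.items.map pvG))).items =
    ((l.foldl (fun d p =>
        d.modify (PySem.List.slice p.1 none (some (-1))) []
          (fun b => b ++ [(PySem.List.pyGetD p.1 (-1) "", p.2)])) d).items).map pvG := by
  induction l with
  | nil => intro d; rfl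
  | cons p l ih =>
    intro d
    simp only [List.foldl_cons, pvStep_map]
    exact ih _

-- A's grouping loop keeps the keys of the dict Nodup
theorem pvNodupFold (l : List (List String × Int)) :
    ∀ d : PySem.Dict (List String) (List (String × Int)), d.keys.Nodup →
    ((l.foldl (fun d p =>
        d.modify (PySem.List.slice p.1 none (some (-1))) []
          (fun b => b ++ [(PySem.List.pyGetD p.1 (-1) "", p.2)])) d).keys).Nodup := by
  induction l with
  | nil => intro d h; exact h
  | cons p l ih =>
    intro d h
    exact ih _ (PySem.Dict.nodup_keys_insert _ _ _ h)

-- A's second loop over a dict with Nodup keys maps pvG over the items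
theorem pvLoop2 (rest : List (List String × List (String × Int))) :
    ∀ pre : List (List String × List (String × Int)),
    ((pre ++ rest).map Prod.fst).Nodup →
    ((rest.map Prod.fst).foldl (fun d c =>
        d.insert c (PySem.List.sorted (d.getD c []) (fun x => x.2) true))
      (PySem.Dict.mk (pre.map pvG ++ rest))).items =
    pre.map pvG ++ rest.map pvG := by
  induction rest with
  | nil => intro pre _; simp
  | cons q rest ih =>
    intro pre hnd
    have hnd' := hnd
    simp only [List.map_append, List.map_cons] at hnd'
    rcases List.nodup_append.mp hnd' with ⟨hpre, hqrest, hdisj⟩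
    have hqnotrest : q.1 ∉ rest.map Prod.fst := (List.nodup_cons.mp hqrest).1
    have hqnotpre : q.1 ∉ pre.map Prod.fst := by
      intro h
      exact hdisj q.1 h q.1 (by exact List.mem_cons_self) rfl
    -- lookup of q.1 finds q
    have hfindpre : (pre.map pvG).find? (fun p => p.1 == q.1) = none := by
      rw [List.find?_eq_none]
      intro r hr
      rcases List.mem_map.mp hr with ⟨r0, hr0, rfl⟩
      simp only [pvG, beq_iff_eq]
      intro h
      exact hqnotpre (h ▸ List.mem_map.mpr ⟨r0, hr0, rfl⟩)
    have hget : (PySem.Dict.mk (pre.map pvG ++ q :: rest)).getD q.1 [] = q.2 := by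
      simp [PySem.Dict.getD, PySem.Dict.get?, List.find?_append, hfindpre]
    have hcont : (PySem.Dict.mk (pre.map pvG ++ q :: rest)).contains q.1 = true := by
      simp [PySem.Dict.contains]
    -- the insert rewrites exactly the entry q
    have hins : (PySem.Dict.mk (pre.map pvG ++ q :: rest)).insert q.1
        (PySem.List.sorted ((PySem.Dict.mk (pre.map pvG ++ q :: rest)).getD q.1 []) (fun x => x.2) true) =
        PySem.Dict.mk ((pre ++ [q]).map pvG ++ rest) := by
      rw [hget]
      simp only [PySem.Dict.insert, hcont, if_pos, List.map_append, List.map_cons]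
      congr 1
      have h1 : List.map (fun p => if (p.1 == q.1) = true then (q.1, PySem.List.sorted q.2 (fun x => x.2) true) else p) (List.map pvG pre) = List.map pvG pre := by
        rw [List.map_map]
        apply List.map_congr_left
        intro r0 hr0
        have hne : ¬((pvG r0).1 = q.1) := fun h =>
          hqnotpre (h ▸ List.mem_map.mpr ⟨r0, hr0, rfl⟩)
        simp only [Function.comp_apply]
        rw [if_neg (by simpa using hne)]
      have h3 : List.map (fun p => if (p.1 == q.1) = true then (q.1, PySem.List.sorted q.2 (fun x => x.2) true) else p) rest = rest := by
        conv_rhs => rw [← List.map_id rest]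
        apply List.map_congr_left
        intro r hr
        have hne : ¬(r.1 = q.1) := fun h =>
          hqnotrest (h ▸ List.mem_map.mpr ⟨r, hr, rfl⟩)
        rw [if_neg (by simpa using hne)]
        rfl
      rw [h1, h3]
      simp [pvG, pvSortDesc]
    simp only [List.map_cons, List.foldl_cons, hins]
    have hnd2 : (((pre ++ [q]) ++ rest).map Prod.fst).Nodup := by
      rw [List.append_assoc]
      simpa using hnd
    simpa using ih (pre ++ [q]) hnd2

-- ===== VERDICT (by name: the statement is the Claim_ definition above) =====
theorem build_context_index_spec : Claim_equal_build_context_index := by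
  intro l _ _
  show build_context_index l = build_context_index_alt l
  unfold build_context_index build_context_index_alt
  have hkeys : (PySem.Dict.keys (l.foldl (fun d p =>
      d.modify (PySem.List.slice p.1 none (some (-1))) []
        (fun b => b ++ [(PySem.List.pyGetD p.1 (-1) "", p.2)])) PySem.Dict.empty)).Nodup :=
    pvNodupFold l PySem.Dict.empty PySem.Dict.nodup_keys_empty
  have hA := pvLoop2 ((l.foldl (fun d p =>
      d.modify (PySem.List.slice p.1 none (some (-1))) []
        (fun b => b ++ [(PySem.List.pyGetD p.1 (-1) "", p.2)])) PySem.Dict.empty).items) []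
    (by simpa [PySem.Dict.keys] using hkeys)
  simp only [List.nil_append, List.map_nil] at hA
  exact hA.trans (pvLoop1 l PySem.Dict.empty).symm
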